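-- pv_equiv track=rewrite | github.com/TimeB1729/codeforces | educational round 180 (div 2)/pB.py | ourfunc
-- ===== SOURCE A (Python) =====
-- def ourfunc(t, test_cases):
--     results=[]
--     for case in test_cases:
--         n,arr = case
--         res = 1
--         for i in range(1, len(arr)):
--             if abs(arr[i] - arr[i-1]) <= 1:
--                 res = 0
--         if res == 1:
--             if arr == sorted(arr) or arr == sorted(arr, reverse=True):
--                 res = -1
--
--         results.append(res)
--     return results
-- ===== SOURCE B (Python) =====
-- def _classify(arr):
--     # one linear pass: early exit on a close adjacent pair; track strict monotonicity flags
--     inc = dec = True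
--     for i in range(1, len(arr)):
--         d = arr[i] - arr[i - 1]
--         if -1 <= d <= 1:
--             return 0
--         if d > 0:
--             dec = False
--         else:
--             inc = False
--     return -1 if (inc or dec) else 1
--
-- def ourfunc(t, test_cases):
--     return [_classify(arr) for _, arr in test_cases]
-- ===== Notes on version B (the rewrite author's own statement) =====
-- stated objective: faster
-- what changed: Replaces the per-case sort-and-compare monotonicity test and the full adjacent-diff loop with a single linear scan that early-exits on the first close pair and tracks increasing/decreasing flags.
import Mathlib
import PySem

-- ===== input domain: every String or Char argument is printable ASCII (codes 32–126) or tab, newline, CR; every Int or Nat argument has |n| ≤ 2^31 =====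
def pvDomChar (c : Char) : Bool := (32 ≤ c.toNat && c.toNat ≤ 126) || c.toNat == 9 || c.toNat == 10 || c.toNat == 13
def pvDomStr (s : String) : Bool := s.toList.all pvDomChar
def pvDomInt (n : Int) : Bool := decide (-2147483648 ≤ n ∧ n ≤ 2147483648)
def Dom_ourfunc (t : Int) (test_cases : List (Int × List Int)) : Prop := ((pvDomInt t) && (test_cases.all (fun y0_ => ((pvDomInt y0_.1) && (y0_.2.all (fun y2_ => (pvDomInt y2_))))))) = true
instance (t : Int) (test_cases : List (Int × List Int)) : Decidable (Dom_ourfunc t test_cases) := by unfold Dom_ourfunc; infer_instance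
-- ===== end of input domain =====

-- B replaces A's per-case full adjacent-diff loop plus two sorts with one linear
-- early-exit scan tracking monotonicity flags (objective: faster, asymptotic).


-- ===== PORT A =====
-- per-case body of A: the full adjacent-diff loop, then the two sorted comparisons
def pvCaseA (arr : List Int) : Int :=
  let res : Int :=
    (PySem.List.pyRange 1 (arr.length : Int) 1).foldl
      (fun res i =>
        if |PySem.List.pyGetD arr i 0 - PySem.List.pyGetD arr (i - 1) 0| ≤ 1 then 0 else res) 1
  if res = 1 then
    if arr = PySem.List.sorted arr (fun x => x) false ∨
       arr = PySem.List.sorted arr (fun x => x) true then -1 else res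
  else res

def ourfunc (t : Int) (test_cases : List (Int × List Int)) : List Int :=
  test_cases.foldl (fun results case => results ++ [pvCaseA case.2]) []

-- ===== PORT B =====
-- B's linear scan: early return 0 on a close pair, else maintain inc/dec flags
def pvGoB (prev : Int) (inc dec : Bool) (rest : List Int) : Int :=
  match rest with
  | [] => if inc || dec then -1 else 1
  | x :: r =>
    let d := x - prev
    if -1 ≤ d ∧ d ≤ 1 then 0
    else if 0 < d then pvGoB x inc false r
    else pvGoB x false dec r

def pvClassifyB (arr : List Int) : Int :=
  match arr with
  | [] => -1
  | x :: rest => pvGoB x true true rest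

def ourfunc_alt (t : Int) (test_cases : List (Int × List Int)) : List Int :=
  test_cases.map (fun case => pvClassifyB case.2)

-- ===== PRECONDITION & SPEC =====
def Spec_ourfunc (t : Int) (test_cases : List (Int × List Int)) (out : List Int) : Prop := out = ourfunc_alt t test_cases
instance (t : Int) (test_cases : List (Int × List Int)) (out : List Int) : Decidable (Spec_ourfunc t test_cases out) := by unfold Spec_ourfunc; infer_instance

-- ===== CLAIM (what is proved, stated in full; the proofs are below) =====
def Claim_equal_ourfunc : Prop := ∀ (t : Int) (test_cases : List (Int × List Int)), Dom_ourfunc t test_cases → Spec_ourfunc t test_cases (ourfunc t test_cases)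

-- ===== LEMMAS AND PROOFS =====

-- has some adjacent pair at distance ≤ 1
def pvClose : List Int → Bool
  | a :: b :: r => (|b - a| ≤ 1) || pvClose (b :: r)
  | _ => false

-- nondecreasing / nonincreasing adjacent chain
def pvLe : List Int → Bool
  | a :: b :: r => (a ≤ b) && pvLe (b :: r)
  | _ => true

def pvGe : List Int → Bool
  | a :: b :: r => (b ≤ a) && pvGe (b :: r)
  | _ => true

theorem pvFoldIf (C : Int → Prop) [DecidablePred C] :
    ∀ (l : List Int) (r : Int),
      l.foldl (fun res i => if C i then 0 else res) r = if l.any (fun i => decide (C i)) then 0 else r := by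
  intro l
  induction l with
  | nil => intro r; simp
  | cons a l ih =>
    intro r
    simp only [List.foldl_cons, List.any_cons]
    by_cases h : C a <;> simp [h, ih]

theorem pvAnyAux : ∀ (l : List Int) (a : Int),
    (List.range l.length).any
      (fun k => decide (|(a :: l).getD (k+1) 0 - (a :: l).getD k 0| ≤ 1)) = pvClose (a :: l)
  | [], a => by simp [pvClose]
  | b :: r, a => by
    rw [List.length_cons, List.range_succ_eq_map]
    simp only [List.any_cons, List.any_map]
    rw [show ((fun k => decide (|(a::b::r).getD (k+1) 0 - (a::b::r).getD k 0| ≤ 1)) ∘ Nat.succ)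
        = (fun k => decide (|(b::r).getD (k+1) 0 - (b::r).getD k 0| ≤ 1)) from rfl]
    rw [pvAnyAux r b]
    simp [pvClose]

theorem pvAnyRange (arr : List Int) :
    ((PySem.List.pyRange 1 (arr.length : Int) 1).any
      (fun i => decide (|PySem.List.pyGetD arr i 0 - PySem.List.pyGetD arr (i - 1) 0| ≤ 1)))
      = pvClose arr := by
  match arr with
  | [] => simp [PySem.List.pyRange_one_eq_nil, pvClose]
  | a :: l =>
    rw [PySem.List.pyRange_one]
    have hn : (((a :: l).length : Int) - 1).toNat = l.length := by simp
    rw [hn, List.any_map, ← pvAnyAux l a]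
    congr 1
    funext k
    have h1 : (1 : Int) + k = ((k + 1 : Nat) : Int) := by push_cast; ring
    have h2 : ((k + 1 : Nat) : Int) - 1 = ((k : Nat) : Int) := by push_cast; ring
    simp only [Function.comp_apply, h1, h2, PySem.List.pyGetD_natCast]

theorem pvLe_iff_pairwise : ∀ (arr : List Int), pvLe arr = true ↔ arr.Pairwise (· ≤ ·)
  | [] => by simp [pvLe]
  | [a] => by simp [pvLe]
  | a :: b :: r => by
    rw [List.pairwise_cons_cons_iff_of_trans, ← pvLe_iff_pairwise (b :: r)]
    simp [pvLe]

theorem pvGe_iff_pairwise : ∀ (arr : List Int), pvGe arr = true ↔ arr.Pairwise (fun a b => b ≤ a)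
  | [] => by simp [pvGe]
  | [a] => by simp [pvGe]
  | a :: b :: r => by
    rw [List.pairwise_cons_cons_iff_of_trans, ← pvGe_iff_pairwise (b :: r)]
    simp [pvGe]

theorem pvSortedEq (arr : List Int) :
    (arr = PySem.List.sorted arr (fun x => x) false) ↔ pvLe arr = true := by
  rw [pvLe_iff_pairwise]
  constructor
  · intro h
    have := PySem.List.sorted_pairwise arr (fun x => x)
    rw [← h] at this; exact this
  · intro h
    exact (PySem.List.sorted_eq_self_of_pairwise arr (fun x => x) h).symm

theorem pvSortedRevEq (arr : List Int) :
    (arr = PySem.List.sorted arr (fun x => x) true) ↔ pvGe arr = true := by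
  rw [pvGe_iff_pairwise]
  constructor
  · intro h
    have := PySem.List.sorted_pairwise_rev arr (fun x => x)
    rw [← h] at this; exact this
  · intro h
    exact (PySem.List.sorted_rev_eq_self_of_pairwise arr (fun x => x) h).symm

theorem pvCaseA_char (arr : List Int) :
    pvCaseA arr = if pvClose arr then 0 else if pvLe arr || pvGe arr then -1 else 1 := by
  unfold pvCaseA
  rw [pvFoldIf (fun i => |PySem.List.pyGetD arr i 0 - PySem.List.pyGetD arr (i - 1) 0| ≤ 1)]
  rw [pvAnyRange]
  by_cases hc : pvClose arr
  · simp [hc]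
  · simp only [hc, Bool.false_eq_true, if_false, if_true]
    by_cases hle : pvLe arr = true <;> by_cases hge : pvGe arr = true <;>
      simp [pvSortedEq, pvSortedRevEq, hle, hge]

theorem pvGoB_spec : ∀ (rest : List Int) (prev : Int) (inc dec : Bool),
    pvGoB prev inc dec rest =
      if pvClose (prev :: rest) then 0
      else if (inc && pvLe (prev :: rest)) || (dec && pvGe (prev :: rest)) then -1 else 1
  | [], prev, inc, dec => by simp [pvGoB, pvClose, pvLe, pvGe]
  | x :: r, prev, inc, dec => by
    rw [pvGoB]
    by_cases hc : -1 ≤ x - prev ∧ x - prev ≤ 1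
    · have habs : |x - prev| ≤ 1 := abs_le.mpr hc
      simp [hc, pvClose, habs]
    · have habs : ¬ (|x - prev| ≤ 1) := fun h => hc (abs_le.mp h)
      rw [if_neg hc]
      by_cases hd : 0 < x - prev
      · have hle : prev ≤ x := by omega
        have hgt : ¬ (x ≤ prev) := by omega
        rw [if_pos hd, pvGoB_spec r x inc false]
        simp [pvClose, pvLe, pvGe, habs, hle, hgt]
      · have hge : x ≤ prev := by omega
        have hlt : ¬ (prev ≤ x) := by omega
        rw [if_neg hd, pvGoB_spec r x false dec]
        simp [pvClose, pvLe, pvGe, habs, hge, hlt]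

theorem pvCase_eq (arr : List Int) : pvCaseA arr = pvClassifyB arr := by
  rw [pvCaseA_char]
  match arr with
  | [] => simp [pvClassifyB, pvClose, pvLe]
  | a :: rest =>
    rw [pvClassifyB, pvGoB_spec]
    simp

-- ===== VERDICT (by name: the statement is the Claim_ definition above) =====
theorem ourfunc_spec : Claim_equal_ourfunc := by
  intro t tcs _
  unfold Spec_ourfunc ourfunc ourfunc_alt
  rw [PySem.List.foldl_append_singleton_eq_map]
  exact List.map_congr_left (fun c _ => pvCase_eq c.2)
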